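-- pv_equiv track=rewrite | github.com/Sakuten/backend | api/id.py | decode_public_id
-- ===== SOURCE A (Python) =====
-- encoder = "ACDEFGHJKLMNPRTWXY"
--
-- def decode_public_id(str_id):
--     """
--         make numeric ID from 4-letter ID
--         Args:
--             str_id (str): ID consisting of a number and 3 alphabets
--         Return:
--             num_id (int): numeric ID
--     """
--     def alpha2num(c):
--         return encoder.find(c)
--
--     def num2num(c):
--         return 5 if c == '9' else int(c) - 3
--
--     alphas = [alpha2num(c) for c in str_id[1:]]
--     alphas.insert(0, num2num(str_id[0]))
--     return sum([alphas[i] * 18**(3-i) for i in range(4)])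
-- ===== SOURCE B (Python) =====
-- encoder = "ACDEFGHJKLMNPRTWXY"
--
-- def decode_public_id(str_id):
--     """Horner evaluation: same digit extraction, running *18 accumulator instead of explicit powers."""
--     result = 5 if str_id[0] == '9' else int(str_id[0]) - 3
--     for c in str_id[1:4]:
--         result = result * 18 + encoder.find(c)
--     return result
-- ===== Notes on version B (the rewrite author's own statement) =====
-- stated objective: simpler
-- what changed: Replaces A's list-building (comprehension, insert(0,..), sum of alphas[i]*18**(3-i) powers) with a single Horner accumulator result = result*18 + digit over the first four characters, with identical digit extraction.
import Mathlib
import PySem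

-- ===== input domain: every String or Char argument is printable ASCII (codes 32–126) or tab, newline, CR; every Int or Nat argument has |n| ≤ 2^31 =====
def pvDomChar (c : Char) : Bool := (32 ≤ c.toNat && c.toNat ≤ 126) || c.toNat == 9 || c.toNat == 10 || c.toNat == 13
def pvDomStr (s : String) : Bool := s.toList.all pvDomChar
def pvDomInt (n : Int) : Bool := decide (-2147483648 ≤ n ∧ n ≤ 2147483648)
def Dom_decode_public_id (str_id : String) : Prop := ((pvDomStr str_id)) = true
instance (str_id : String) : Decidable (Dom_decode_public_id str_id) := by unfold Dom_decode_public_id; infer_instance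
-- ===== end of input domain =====

-- B evaluates the base-18 polynomial by a Horner accumulator instead of A's list + insert + sum of 18**(3-i) powers (objective: simpler).

def pvEncoder : String := "ACDEFGHJKLMNPRTWXY"

-- ===== PORT A =====
def pv_alpha2num (c : Char) : Int := PySem.Str.find pvEncoder (String.ofList [c])

def pv_num2num (c : Char) : Int :=
  if c = '9' then 5 else (PySem.Int.ofStr? (String.ofList [c])).getD 0 - 3

def decode_public_id (str_id : String) : Int :=
  let alphas0 : List Int := (PySem.Str.slice str_id (some 1) none).toList.map pv_alpha2num
  let alphas : List Int :=
    PySem.List.insert alphas0 0 (pv_num2num ((PySem.Str.pyGet? str_id 0).getD ' '))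
  (((PySem.List.pyRange 0 4 1).map
      (fun i => (PySem.List.pyGet? alphas i).getD 0 * 18 ^ (3 - i).toNat))).sum

-- ===== PORT B =====
def decode_public_id_alt (str_id : String) : Int :=
  let c0 : Char := (PySem.Str.pyGet? str_id 0).getD ' '
  let r0 : Int := if c0 = '9' then 5 else (PySem.Int.ofStr? (String.ofList [c0])).getD 0 - 3
  (PySem.Str.slice str_id (some 1) (some 4)).toList.foldl
    (fun r c => r * 18 + PySem.Str.find pvEncoder (String.ofList [c])) r0

-- ===== PRECONDITION & SPEC =====
-- A raises IndexError on strings shorter than 4 chars, and ValueError when the first char is not a decimal digit.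
def Pre_decode_public_id (str_id : String) : Prop :=
  4 ≤ str_id.toList.length ∧ PySem.Chars.isdigit (str_id.toList.headD ' ') = true
instance (str_id : String) : Decidable (Pre_decode_public_id str_id) := by
  unfold Pre_decode_public_id; infer_instance

def pvWitness_decode_public_id : String := "5ACD"

def Spec_decode_public_id (str_id : String) (out : Int) : Prop := out = decode_public_id_alt str_id
instance (str_id : String) (out : Int) : Decidable (Spec_decode_public_id str_id out) := by unfold Spec_decode_public_id; infer_instance

-- ===== CLAIM (what is proved, stated in full; the proofs are below) =====
def Claim_equal_decode_public_id : Prop := ∀ (str_id : String), Dom_decode_public_id str_id → Pre_decode_public_id str_id → Spec_decode_public_id str_id (decode_public_id str_id)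

-- ===== LEMMAS AND PROOFS =====

-- ===== VERDICT =====
set_option maxHeartbeats 1000000 in
theorem decode_public_id_spec : Claim_equal_decode_public_id := by
  intro s _ hpre
  obtain ⟨hlen, _⟩ := hpre
  obtain ⟨a, b, c, d, t, hl⟩ :
      ∃ a b c d t, s.toList = a :: b :: c :: d :: t := by
    match h : s.toList with
    | x1 :: x2 :: x3 :: x4 :: t => exact ⟨x1, x2, x3, x4, t, rfl⟩
    | [] | [_] | [_,_] | [_,_,_] => simp [h] at hlen
  unfold Spec_decode_public_id decode_public_id decode_public_id_alt
  simp only [pysem] at *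
  rw [hl]
  simp [pysem, List.range_succ, PySem.List.slice,
        PySem.List.pyRange, pv_num2num, pv_alpha2num, List.foldl]
  split_ifs <;> ring
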